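-- pv_equiv track=rewrite | github.com/sciath/sciath | sciath/test.py | compareLiteral
-- ===== SOURCE A (Python) =====
-- def compareLiteral(input,expected):
--   status = True
--   err = ''
--   if len(input) != len(expected):
--     err = err + "compareLiteral [failed]\nReason: input and expected are of different length\n"
--     err = err + ("  expected: %s\n" % expected)
--     err = err + ("  input:    %s\n" % input)
--     status = False
--     return status,err
--   for index in range(0,len(expected)):
--     if input[index] != expected[index]:
--       if status:
--         err = err + "compareLiteral [failed]\nReason: strings are different\n"
--         err = err + ("  expected: %s\n" % expected)
--         err = err + ("  input:    %s\n" % input)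
--       err = err + "  index[" + str(index) +  "]" + " input \"" +  input[index] + "\" != expected \"" + expected[index] + "\"\n"
--       status = False
--   return status,err
-- ===== SOURCE B (Python) =====
-- def compareLiteral(input, expected):
--     if len(input) != len(expected):
--         err = ("compareLiteral [failed]\nReason: input and expected are of different length\n"
--                + "  expected: %s\n" % (expected,)
--                + "  input:    %s\n" % (input,))
--         return False, err
--     diffs = [i for i in range(len(expected)) if input[i] != expected[i]]
--     if not diffs:
--         return True, ''
--     err = ("compareLiteral [failed]\nReason: strings are different\n"
--            + "  expected: %s\n" % (expected,)
--            + "  input:    %s\n" % (input,))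
--     for i in diffs:
--         err = err + '  index[' + str(i) + '] input "' + input[i] + '" != expected "' + expected[i] + '"\n'
--     return False, err
-- ===== Notes on version B (the rewrite author's own statement) =====
-- stated objective: simpler
-- what changed: B first computes the list of differing indices in one pass, then (if any) renders the header once and appends one report line per differing index, instead of A's single loop threading a status flag that decides when to emit the header.
import Mathlib
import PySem

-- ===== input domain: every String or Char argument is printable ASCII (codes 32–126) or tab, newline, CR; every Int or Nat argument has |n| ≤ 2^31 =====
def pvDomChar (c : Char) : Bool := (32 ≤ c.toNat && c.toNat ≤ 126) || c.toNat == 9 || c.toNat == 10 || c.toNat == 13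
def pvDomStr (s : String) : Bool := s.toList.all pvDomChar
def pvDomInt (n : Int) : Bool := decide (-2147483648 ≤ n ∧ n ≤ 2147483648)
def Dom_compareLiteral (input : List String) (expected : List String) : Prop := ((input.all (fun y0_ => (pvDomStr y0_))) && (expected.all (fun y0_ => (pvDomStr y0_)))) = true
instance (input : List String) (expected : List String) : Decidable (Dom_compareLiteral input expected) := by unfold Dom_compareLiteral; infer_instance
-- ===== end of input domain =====

-- B splits detection from reporting: one pass collects the differing indices, a second pass renders
-- the report (objective: simpler/alternative decomposition, same exact output).  No mutation involved.

-- Python repr of a str / of a list of str ("%s" % list), exact on the Dom alphabet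
-- (printable ASCII plus tab/newline/CR): quote is ' unless the string contains ' and no ",
-- and \\, the quote, \t, \n, \r are escaped.  Shared semantic helper (both Pythons call the
-- same interpreter-level formatting).
def pyReprChar (q : Char) (c : Char) : String :=
  if c = '\\' then "\\\\"
  else if c = q then "\\" ++ String.ofList [q]
  else if c = '\t' then "\\t"
  else if c = '\n' then "\\n"
  else if c = '\r' then "\\r"
  else String.ofList [c]

def pyReprStr (s : String) : String :=
  let q : Char := if s.toList.contains '\'' && !(s.toList.contains '"') then '"' else '\''
  String.ofList [q] ++ String.join (s.toList.map (pyReprChar q)) ++ String.ofList [q]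

def pyReprList (xs : List String) : String :=
  "[" ++ String.intercalate ", " (xs.map pyReprStr) ++ "]"

-- ===== PORT A =====
-- the loop body of A: status/err accumulator, header emitted while status is still True
def aStep (input expected : List String) (st : Bool × String) (index : Int) : Bool × String :=
  -- index ranges over range(0, len(expected)) and len(input) = len(expected), so the
  -- indexings are always in range and pyGetD is exact
  if PySem.List.pyGetD input index "" != PySem.List.pyGetD expected index "" then
    (false,
      (if st.1 then
        st.2 ++ "compareLiteral [failed]\nReason: strings are different\n"
          ++ ("  expected: " ++ pyReprList expected ++ "\n")
          ++ ("  input:    " ++ pyReprList input ++ "\n")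
       else st.2)
      ++ "  index[" ++ PySem.Int.toStr index ++ "]" ++ " input \""
      ++ PySem.List.pyGetD input index "" ++ "\" != expected \""
      ++ PySem.List.pyGetD expected index "" ++ "\"\n")
  else st

def compareLiteral (input : List String) (expected : List String) : Bool × String :=
  if input.length ≠ expected.length then
    (false,
      "" ++ "compareLiteral [failed]\nReason: input and expected are of different length\n"
        ++ ("  expected: " ++ pyReprList expected ++ "\n")
        ++ ("  input:    " ++ pyReprList input ++ "\n"))
  else
    (PySem.List.pyRange 0 (expected.length : Int) 1).foldl (aStep input expected) (true, "")

-- ===== PORT B =====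
-- B's report line for one differing index (the loop body of B's second pass)
def bLine (input expected : List String) (err : String) (i : Int) : String :=
  err ++ "  index[" ++ PySem.Int.toStr i ++ "] input \""
      ++ PySem.List.pyGetD input i "" ++ "\" != expected \""
      ++ PySem.List.pyGetD expected i "" ++ "\"\n"

def compareLiteral_alt (input : List String) (expected : List String) : Bool × String :=
  if input.length ≠ expected.length then
    (false,
      "compareLiteral [failed]\nReason: input and expected are of different length\n"
        ++ ("  expected: " ++ pyReprList expected ++ "\n")
        ++ ("  input:    " ++ pyReprList input ++ "\n"))
  else
    let diffs := (PySem.List.pyRange 0 (expected.length : Int) 1).filter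
      (fun i => PySem.List.pyGetD input i "" != PySem.List.pyGetD expected i "")
    if diffs = [] then (true, "")
    else
      (false, diffs.foldl (bLine input expected)
        ("compareLiteral [failed]\nReason: strings are different\n"
          ++ ("  expected: " ++ pyReprList expected ++ "\n")
          ++ ("  input:    " ++ pyReprList input ++ "\n")))

-- ===== PRECONDITION & SPEC =====
def Spec_compareLiteral (input : List String) (expected : List String) (out : Bool × String) : Prop := out = compareLiteral_alt input expected
instance (input : List String) (expected : List String) (out : Bool × String) : Decidable (Spec_compareLiteral input expected out) := by unfold Spec_compareLiteral; infer_instance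

-- ===== CLAIM (what is proved, stated in full; the proofs are below) =====
def Claim_equal_compareLiteral : Prop := ∀ (input : List String) (expected : List String), Dom_compareLiteral input expected → Spec_compareLiteral input expected (compareLiteral input expected)

-- ===== LEMMAS AND PROOFS =====

-- the two Pythons split the literal '] input "' differently; merge the pieces
lemma lit_merge (s : String) : ("]" : String) ++ (" input \"" ++ s) = "] input \"" ++ s := by
  rw [← String.append_assoc]
  rfl

-- once A's status is False, the loop just appends B's line for each further differing index
lemma foldA_false (input expected : List String) (l : List Int) (e : String) :
    l.foldl (aStep input expected) (false, e)
      = (false,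
          (l.filter (fun i => PySem.List.pyGetD input i "" != PySem.List.pyGetD expected i "")).foldl
            (bLine input expected) e) := by
  induction l generalizing e with
  | nil => rfl
  | cons i l ih =>
      by_cases h : (PySem.List.pyGetD input i "" != PySem.List.pyGetD expected i "") = true
      · simp only [List.foldl_cons, List.filter_cons, h, if_pos, aStep, ih, bLine,
          String.append_assoc]
        simp [lit_merge]
      · simp only [List.foldl_cons, List.filter_cons, h, Bool.false_eq_true, if_false, aStep, ih]

-- A's full loop from (True, '') equals B's detect-then-report decomposition
lemma foldA_true (input expected : List String) (l : List Int) :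
    l.foldl (aStep input expected) (true, "")
      = (let diffs := l.filter (fun i => PySem.List.pyGetD input i "" != PySem.List.pyGetD expected i "");
         if diffs = [] then ((true : Bool), "")
         else (false, diffs.foldl (bLine input expected)
            ("compareLiteral [failed]\nReason: strings are different\n"
              ++ ("  expected: " ++ pyReprList expected ++ "\n")
              ++ ("  input:    " ++ pyReprList input ++ "\n")))) := by
  induction l with
  | nil => rfl
  | cons i l ih =>
      by_cases h : (PySem.List.pyGetD input i "" != PySem.List.pyGetD expected i "") = true
      · simp only [List.foldl_cons, List.filter_cons, h, if_pos]
        rw [show aStep input expected (true, "") i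
              = (false,
                  bLine input expected
                    ("compareLiteral [failed]\nReason: strings are different\n"
                      ++ ("  expected: " ++ pyReprList expected ++ "\n")
                      ++ ("  input:    " ++ pyReprList input ++ "\n")) i) by
            simp [aStep, h, bLine, String.empty_append, String.append_assoc]]
        rw [foldA_false]
        simp
      · simp only [List.foldl_cons, List.filter_cons, h, Bool.false_eq_true, if_false]
        rw [show aStep input expected (true, "") i = (true, "") by simp [aStep, h]]
        exact ih

-- ===== VERDICT (by name: the statement is the Claim_ definition above) =====
theorem compareLiteral_spec : Claim_equal_compareLiteral := by
  intro input expected _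
  unfold Spec_compareLiteral compareLiteral compareLiteral_alt
  by_cases h : input.length ≠ expected.length
  · rw [if_pos h, if_pos h]
    simp [String.empty_append, String.append_assoc]
  · rw [if_neg h, if_neg h]
    exact foldA_true input expected _
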